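-- pv_equiv track=rewrite | github.com/omer475/ten-news-website | step6_world_event_detection.py | find_duplicate_event
-- ===== SOURCE A (Python) =====
-- from typing import List, Dict, Optional
--
-- def find_duplicate_event(new_name: str, existing_events: List[Dict]) -> Optional[Dict]:
--     """
--     Check if a proposed new event name is too similar to an existing event.
--     Returns the matching existing event if duplicate found, None otherwise.
--
--     Uses word overlap to catch cases like "Ukraine War" vs "Russia-Ukraine War".
--     """
--     STOP_WORDS = {'the', 'of', 'in', 'and', 'a', 'to', 'for', 'on', 'at', 'by', 'with', 'from', 'new'}
--
--     new_words = set(new_name.lower().replace('-', ' ').replace("'", '').split()) - STOP_WORDS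
--
--     best_match = None
--     best_overlap = 0
--
--     for event in existing_events:
--         existing_words = set(event['name'].lower().replace('-', ' ').replace("'", '').split()) - STOP_WORDS
--         overlap = new_words & existing_words
--
--         # If 2+ significant words overlap, it's likely a duplicate
--         if len(overlap) >= 2 and len(overlap) > best_overlap:
--             best_overlap = len(overlap)
--             best_match = event
--
--         # Also check if one name is a substring of the other
--         new_lower = new_name.lower().replace("'", '')
--         existing_lower = event['name'].lower().replace("'", '')
--         if (new_lower in existing_lower or existing_lower in new_lower) and len(new_lower) > 5:
--             return event
--
--     return best_match
-- ===== SOURCE B (Python) =====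
-- from typing import List, Dict, Optional
--
-- def find_duplicate_event(new_name: str, existing_events: List[Dict]) -> Optional[Dict]:
--     """Two-phase re-implementation: a substring pass (which always wins),
--     then max-overlap computed as max-of-sizes + first index attaining it."""
--     STOP_WORDS = {'the', 'of', 'in', 'and', 'a', 'to', 'for', 'on', 'at', 'by', 'with', 'from', 'new'}
--
--     def norm(s):
--         return s.lower().replace("'", '')
--
--     def words(s):
--         return set(s.lower().replace('-', ' ').replace("'", '').split()) - STOP_WORDS
--
--     new_lower = norm(new_name)
--
--     # Phase 1: first event whose normalised name is a substring of the new
--     # name (or vice versa) is returned immediately.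
--     if len(new_lower) > 5:
--         for event in existing_events:
--             existing_lower = norm(event['name'])
--             if new_lower in existing_lower or existing_lower in new_lower:
--                 return event
--
--     # Phase 2: compute all overlap sizes, take the maximum, and return the
--     # first event attaining it (if the maximum is at least 2).
--     new_words = words(new_name)
--     sizes = [len(new_words & words(event['name'])) for event in existing_events]
--     m = max(sizes, default=0)
--     if m < 2:
--         return None
--     return existing_events[sizes.index(m)]
-- ===== Notes on version B (the rewrite author's own statement) =====
-- stated objective: alternative
-- what changed: A's single fused loop (running best-overlap accumulator plus an early-return substring test per event) is replaced by two independent phases: a substring scan that returns the first match, then a list of all overlap sizes whose maximum is taken and the first event attaining it is returned via index lookup, eliminating the running-best state.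
-- outside the precondition, e.g. on find_duplicate_event('abcdef', [{'name': 'abcdef'}, {}]): A returns {'name': 'abcdef'}, B returns {'name': 'abcdef'}
import Mathlib
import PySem

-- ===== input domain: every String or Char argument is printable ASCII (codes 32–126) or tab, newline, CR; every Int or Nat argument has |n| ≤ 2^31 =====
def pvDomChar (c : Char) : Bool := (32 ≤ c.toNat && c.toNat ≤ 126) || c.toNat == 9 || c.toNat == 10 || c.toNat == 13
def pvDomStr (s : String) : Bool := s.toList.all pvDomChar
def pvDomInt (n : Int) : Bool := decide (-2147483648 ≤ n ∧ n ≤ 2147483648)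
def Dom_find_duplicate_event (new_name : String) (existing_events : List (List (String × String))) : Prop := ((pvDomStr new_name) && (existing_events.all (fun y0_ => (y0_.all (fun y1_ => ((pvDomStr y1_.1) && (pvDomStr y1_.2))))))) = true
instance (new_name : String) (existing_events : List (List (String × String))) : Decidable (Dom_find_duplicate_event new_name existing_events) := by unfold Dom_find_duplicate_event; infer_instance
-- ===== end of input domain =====

-- B replaces A's fused loop (running best-overlap accumulator + per-event early-return substring test) by two
-- independent phases: a substring scan, then max of the overlap-size list + first index attaining it (alternative).


-- ===== PORT A =====
-- event['name']: dict lookup; the KeyError case (no "name" key) is excluded by Pre_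
def pvName (e : List (String × String)) : String := ((PySem.Dict.mk e).get? "name").getD ""

def pvStop : PySem.Set String :=
  PySem.Set.ofList ["the", "of", "in", "and", "a", "to", "for", "on", "at", "by", "with", "from", "new"]

-- set(s.lower().replace('-', ' ').replace("'", '').split()) - STOP_WORDS
def pvWordsOf (s : String) : PySem.Set String :=
  PySem.Set.diff
    (PySem.Set.ofList (PySem.Str.split₀ (PySem.Str.replace (PySem.Str.replace (PySem.Str.lower s) "-" " ") "'" "")))
    pvStop

-- s.lower().replace("'", '')
def pvNormOf (s : String) : String := PySem.Str.replace (PySem.Str.lower s) "'" ""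

def findLoopA (new_name : String) (new_words : PySem.Set String) :
    List (List (String × String)) → Option (List (String × String)) → Int → Option (List (String × String))
  | [], best_match, _ => best_match
  | event :: rest, best_match, best_overlap =>
    if (PySem.Str.isIn (pvNormOf new_name) (pvNormOf (pvName event))
          || PySem.Str.isIn (pvNormOf (pvName event)) (pvNormOf new_name))
        && decide (PySem.Str.len (pvNormOf new_name) > 5) then
      some event
    else
      findLoopA new_name new_words rest
        (if PySem.Set.len (PySem.Set.inter new_words (pvWordsOf (pvName event))) ≥ 2
            ∧ PySem.Set.len (PySem.Set.inter new_words (pvWordsOf (pvName event))) > best_overlap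
         then some event else best_match)
        (if PySem.Set.len (PySem.Set.inter new_words (pvWordsOf (pvName event))) ≥ 2
            ∧ PySem.Set.len (PySem.Set.inter new_words (pvWordsOf (pvName event))) > best_overlap
         then PySem.Set.len (PySem.Set.inter new_words (pvWordsOf (pvName event))) else best_overlap)

def find_duplicate_event (new_name : String) (existing_events : List (List (String × String))) : Option (List (String × String)) :=
  findLoopA new_name (pvWordsOf new_name) existing_events none 0

-- ===== PORT B =====
-- phase 1 of Source B: first event whose normalised name substring-matches new_lower
def pvSubScan (new_lower : String) : List (List (String × String)) → Option (List (String × String))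
  | [] => none
  | event :: rest =>
    if PySem.Str.isIn new_lower (pvNormOf (pvName event)) || PySem.Str.isIn (pvNormOf (pvName event)) new_lower then
      some event
    else pvSubScan new_lower rest

-- phase 2 of Source B: sizes = [len(new_words & words(e['name'])) … ]; m = max(sizes, default=0);
-- None if m < 2 else existing_events[sizes.index(m)]
def find_duplicate_event_alt (new_name : String) (existing_events : List (List (String × String))) : Option (List (String × String)) :=
  match (if PySem.Str.len (pvNormOf new_name) > 5 then pvSubScan (pvNormOf new_name) existing_events else none) with
  | some event => some event
  | none =>
    if ((PySem.List.max? (existing_events.map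
          (fun event => PySem.Set.len (PySem.Set.inter (pvWordsOf new_name) (pvWordsOf (pvName event))))) (fun y => y)).getD 0) < 2 then
      none
    else
      (PySem.List.index? (existing_events.map
          (fun event => PySem.Set.len (PySem.Set.inter (pvWordsOf new_name) (pvWordsOf (pvName event)))))
          (((PySem.List.max? (existing_events.map
          (fun event => PySem.Set.len (PySem.Set.inter (pvWordsOf new_name) (pvWordsOf (pvName event))))) (fun y => y)).getD 0))).bind
        (fun i => PySem.List.pyGet? existing_events (i : Int))

-- ===== PRECONDITION & SPEC =====
-- Pre_ excludes event lists in which some event lacks a "name" key: the Python raises KeyError as soon as such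
-- an event is scanned (B raises on exactly the same inputs as A); only when an earlier event already
-- substring-matches does A return before reaching the bad event, and B then returns the same value as A.
def Pre_find_duplicate_event (new_name : String) (existing_events : List (List (String × String))) : Prop :=
  existing_events.all (fun e => e.any (fun p => p.1 == "name")) = true
instance (new_name : String) (existing_events : List (List (String × String))) : Decidable (Pre_find_duplicate_event new_name existing_events) := by unfold Pre_find_duplicate_event; infer_instance

def pvWitness_find_duplicate_event : String × (List (List (String × String))) :=
  ("ukraine war", [[("name", "russia ukraine war")]])

def Spec_find_duplicate_event (new_name : String) (existing_events : List (List (String × String))) (out : Option (List (String × String))) : Prop := out = find_duplicate_event_alt new_name existing_events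
instance (new_name : String) (existing_events : List (List (String × String))) (out : Option (List (String × String))) : Decidable (Spec_find_duplicate_event new_name existing_events out) := by unfold Spec_find_duplicate_event; infer_instance

-- ===== CLAIM (what is proved, stated in full; the proofs are below) =====
def Claim_equal_find_duplicate_event : Prop := ∀ (new_name : String) (existing_events : List (List (String × String))), Dom_find_duplicate_event new_name existing_events → Pre_find_duplicate_event new_name existing_events → Spec_find_duplicate_event new_name existing_events (find_duplicate_event new_name existing_events)

-- ===== LEMMAS AND PROOFS =====

-- proof-only abbreviations for the two per-event quantities
def pvSz (n : String) (e : List (String × String)) : Int :=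
  PySem.Set.len (PySem.Set.inter (pvWordsOf n) (pvWordsOf (pvName e)))

def pvCond (n : String) (e : List (String × String)) : Bool :=
  (PySem.Str.isIn (pvNormOf n) (pvNormOf (pvName e)) || PySem.Str.isIn (pvNormOf (pvName e)) (pvNormOf n))
    && decide (PySem.Str.len (pvNormOf n) > 5)

-- the pure best-overlap accumulator loop (A's loop with the substring test removed)
def pvBF (n : String) : List (List (String × String)) → Option (List (String × String)) → Int → Option (List (String × String))
  | [], best, _ => best
  | e :: r, best, ov =>
    if pvSz n e ≥ 2 ∧ pvSz n e > ov then pvBF n r (some e) (pvSz n e) else pvBF n r best ov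

-- the maximum of the overlap sizes (0 for the empty list)
def pvMaxSz (n : String) : List (List (String × String)) → Int
  | [] => 0
  | e :: r => max (pvSz n e) (pvMaxSz n r)

lemma pvSz_nonneg (n : String) (e : List (String × String)) : 0 ≤ pvSz n e := by
  simp only [pvSz, PySem.Set.len]; exact Int.natCast_nonneg _

-- A's loop splits: the first substring match wins, otherwise it is the pure accumulator loop
lemma findLoopA_split (n : String) :
    ∀ (l : List (List (String × String))) (best : Option (List (String × String))) (ov : Int),
      findLoopA n (pvWordsOf n) l best ov =
        (match l.find? (pvCond n) with
         | some e => some e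
         | none => pvBF n l best ov) := by
  intro l
  induction l with
  | nil => intro best ov; rfl
  | cons e r ih =>
    intro best ov
    rw [show findLoopA n (pvWordsOf n) (e :: r) best ov =
          (if pvCond n e = true then some e
           else findLoopA n (pvWordsOf n) r
             (if pvSz n e ≥ 2 ∧ pvSz n e > ov then some e else best)
             (if pvSz n e ≥ 2 ∧ pvSz n e > ov then pvSz n e else ov)) from rfl]
    by_cases hc : pvCond n e = true
    · rw [List.find?_cons_of_pos hc, if_pos hc]
    · have hc' : pvCond n e = false := by simpa using hc
      rw [List.find?_cons_of_neg (by simp [hc']), if_neg (by simp [hc']), ih]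
      cases hf : r.find? (pvCond n) with
      | some e' => rfl
      | none =>
        by_cases h2 : pvSz n e ≥ 2 ∧ pvSz n e > ov
        · rw [if_pos h2, if_pos h2,
              show pvBF n (e :: r) best ov =
                (if pvSz n e ≥ 2 ∧ pvSz n e > ov then pvBF n r (some e) (pvSz n e) else pvBF n r best ov) from rfl,
              if_pos h2]
        · rw [if_neg h2, if_neg h2,
              show pvBF n (e :: r) best ov =
                (if pvSz n e ≥ 2 ∧ pvSz n e > ov then pvBF n r (some e) (pvSz n e) else pvBF n r best ov) from rfl,
              if_neg h2]

-- the accumulator loop computes: the first event attaining the maximal size, if that max beats ov and 2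
lemma pvBF_spec (n : String) :
    ∀ (l : List (List (String × String))) (best : Option (List (String × String))) (ov : Int),
      pvBF n l best ov =
        if pvMaxSz n l > ov ∧ 2 ≤ pvMaxSz n l then l.find? (fun e => pvSz n e == pvMaxSz n l) else best := by
  intro l
  induction l with
  | nil =>
    intro best ov
    rw [show pvBF n [] best ov = best from rfl, show pvMaxSz n [] = 0 from rfl, if_neg (by omega)]
  | cons e r ih =>
    intro best ov
    rw [show pvBF n (e :: r) best ov =
          (if pvSz n e ≥ 2 ∧ pvSz n e > ov then pvBF n r (some e) (pvSz n e) else pvBF n r best ov) from rfl,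
        show pvMaxSz n (e :: r) = max (pvSz n e) (pvMaxSz n r) from rfl]
    by_cases h2 : pvSz n e ≥ 2 ∧ pvSz n e > ov
    · rw [if_pos h2, ih]
      by_cases hle : pvMaxSz n r ≤ pvSz n e
      · rw [max_eq_left hle, if_neg (by omega), if_pos ⟨h2.2, h2.1⟩,
            List.find?_cons_of_pos (by simp)]
      · have hlt : pvSz n e < pvMaxSz n r := by omega
        rw [max_eq_right hlt.le, if_pos ⟨hlt, by omega⟩, if_pos ⟨by omega, by omega⟩,
            List.find?_cons_of_neg (by simp; omega)]
    · rw [if_neg h2, ih]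
      by_cases h3 : pvMaxSz n r > ov ∧ 2 ≤ pvMaxSz n r
      · have hsm : pvSz n e < pvMaxSz n r := by omega
        rw [if_pos h3, max_eq_right hsm.le, if_pos h3,
            List.find?_cons_of_neg (by simp; omega)]
      · rw [if_neg h3, if_neg (by rcases max_choice (pvSz n e) (pvMaxSz n r) with hC | hC <;> rw [hC] <;> omega)]

lemma pvFoldlMax (n : String) :
    ∀ (l : List (List (String × String))) (a : Int), 0 ≤ a →
      List.foldl max a (l.map (fun e => pvSz n e)) = max a (pvMaxSz n l) := by
  intro l
  induction l with
  | nil => intro a ha; rw [show pvMaxSz n [] = 0 from rfl, max_eq_left ha]; rfl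
  | cons e r ih =>
    intro a ha
    rw [List.map_cons, List.foldl_cons, ih (max a (pvSz n e)) (le_trans ha (le_max_left _ _)),
        show pvMaxSz n (e :: r) = max (pvSz n e) (pvMaxSz n r) from rfl, max_assoc]

-- max(sizes, default=0) over the size list is pvMaxSz
lemma pvMax_eq (n : String) (l : List (List (String × String))) :
    ((PySem.List.max? (l.map (fun e => pvSz n e)) (fun y => y)).getD 0) = pvMaxSz n l := by
  cases l with
  | nil => rfl
  | cons e r =>
    rw [List.map_cons, PySem.List.max?_id_cons, Option.getD_some,
        pvFoldlMax n r (pvSz n e) (pvSz_nonneg n e)]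
    rfl

-- sizes.index(m) followed by existing_events[i] is the first event attaining m
lemma pvIndex_eq (n : String) (m : Int) :
    ∀ (l : List (List (String × String))),
      ((PySem.List.index? (l.map (fun e => pvSz n e)) m).bind (fun i => PySem.List.pyGet? l (i : Int)))
        = l.find? (fun e => pvSz n e == m) := by
  intro l
  induction l with
  | nil => rfl
  | cons e r ih =>
    rw [List.map_cons]
    have hcons : PySem.List.index? (pvSz n e :: r.map (fun e => pvSz n e)) m
        = (if (pvSz n e == m) = true then some 0
           else (PySem.List.index? (r.map (fun e => pvSz n e)) m).map (· + 1)) := by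
      simp [PySem.List.index?, List.idxOf?, List.findIdx?_cons]
    by_cases hc : (pvSz n e == m) = true
    · rw [List.find?_cons_of_pos (p := fun x => pvSz n x == m) (a := e) hc, hcons, if_pos hc]
      simp [pysem]
    · have hc' : (pvSz n e == m) = false := by simpa using hc
      rw [List.find?_cons_of_neg (p := fun x => pvSz n x == m) (a := e) (by simp [hc']), ← ih, hcons,
          if_neg (by simp [hc'])]
      cases hidx : PySem.List.index? (r.map (fun e => pvSz n e)) m with
      | none => rfl
      | some i => simp

-- B's guarded substring scan is find? of A's combined condition
lemma pvSubScan_eq (n : String) (l : List (List (String × String))) :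
    (if PySem.Str.len (pvNormOf n) > 5 then pvSubScan (pvNormOf n) l else none) = l.find? (pvCond n) := by
  by_cases h5 : PySem.Str.len (pvNormOf n) > 5
  · rw [if_pos h5]
    have hdec : decide (PySem.Str.len (pvNormOf n) > 5) = true := decide_eq_true h5
    have hps : ∀ e, pvCond n e =
        (PySem.Str.isIn (pvNormOf n) (pvNormOf (pvName e)) || PySem.Str.isIn (pvNormOf (pvName e)) (pvNormOf n)) := by
      intro e; simp only [pvCond, hdec, Bool.and_true]
    induction l with
    | nil => rfl
    | cons e r ih =>
      rw [show pvSubScan (pvNormOf n) (e :: r) =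
            (if (PySem.Str.isIn (pvNormOf n) (pvNormOf (pvName e))
                  || PySem.Str.isIn (pvNormOf (pvName e)) (pvNormOf n)) = true
             then some e else pvSubScan (pvNormOf n) r) from rfl]
      by_cases hc : (PySem.Str.isIn (pvNormOf n) (pvNormOf (pvName e))
                      || PySem.Str.isIn (pvNormOf (pvName e)) (pvNormOf n)) = true
      · rw [if_pos hc, List.find?_cons_of_pos (by rw [hps]; exact hc)]
      · rw [if_neg hc, List.find?_cons_of_neg (by rw [hps]; simpa using hc), ih]
  · rw [if_neg h5]
    symm
    rw [List.find?_eq_none]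
    intro e _
    have hdec : decide (PySem.Str.len (pvNormOf n) > 5) = false := decide_eq_false h5
    simp only [pvCond, hdec, Bool.and_false, Bool.false_eq_true, not_false_eq_true]

lemma pvAlt_some (n : String) (l : List (List (String × String))) (e : List (String × String))
    (h : (if PySem.Str.len (pvNormOf n) > 5 then pvSubScan (pvNormOf n) l else none) = some e) :
    find_duplicate_event_alt n l = some e := by
  unfold find_duplicate_event_alt
  rw [h]

lemma pvAlt_none (n : String) (l : List (List (String × String)))
    (h : (if PySem.Str.len (pvNormOf n) > 5 then pvSubScan (pvNormOf n) l else none) = none) :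
    find_duplicate_event_alt n l =
      (if ((PySem.List.max? (l.map (fun e => pvSz n e)) (fun y => y)).getD 0) < 2 then none
       else (PySem.List.index? (l.map (fun e => pvSz n e))
             (((PySem.List.max? (l.map (fun e => pvSz n e)) (fun y => y)).getD 0))).bind
              (fun i => PySem.List.pyGet? l (i : Int))) := by
  unfold find_duplicate_event_alt
  rw [h]
  rfl

-- ===== VERDICT (by name: the statement is the Claim_ definition above) =====
theorem find_duplicate_event_spec : Claim_equal_find_duplicate_event := by
  intro n l _ _
  unfold Spec_find_duplicate_event
  rw [show find_duplicate_event n l = findLoopA n (pvWordsOf n) l none 0 from rfl, findLoopA_split]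
  cases hf : l.find? (pvCond n) with
  | some e =>
    rw [pvAlt_some n l e (by rw [pvSubScan_eq, hf])]
  | none =>
    rw [pvAlt_none n l (by rw [pvSubScan_eq, hf]),
        pvBF_spec n l none 0, pvMax_eq, pvIndex_eq]
    by_cases hm : 2 ≤ pvMaxSz n l
    · rw [if_pos ⟨by omega, hm⟩, if_neg (by omega)]
    · rw [if_neg (by omega), if_pos (by omega)]
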